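-- pv_equiv track=rewrite | github.com/Kalparatna/Ai-planet-Assignment | server/services/response_formatter.py | _extract_problem
-- ===== SOURCE A (Python) =====
-- def _extract_problem(text: str) -> str:
--     """Extract the problem statement"""
--
--     lines = text.split('\n')
--     for line in lines:
--         if line.lower().startswith('problem:'):
--             return line.replace('Problem:', '').strip()
--
--     # Try to find first meaningful line
--     for line in lines:
--         if len(line.strip()) > 10 and not line.startswith('#'):
--             return line.strip()
--
--     return "Mathematical Problem"
-- ===== SOURCE B (Python) =====
-- def _extract_problem(text: str) -> str:
--     """Extract the problem statement (single pass)."""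
--     candidate = None
--     for line in text.split('\n'):
--         if line.lower().startswith('problem:'):
--             return line.replace('Problem:', '').strip()
--         if candidate is None and len(line.strip()) > 10 and not line.startswith('#'):
--             candidate = line.strip()
--     return candidate if candidate is not None else "Mathematical Problem"
-- ===== Notes on version B (the rewrite author's own statement) =====
-- stated objective: simpler
-- what changed: Fuses A's two sequential scans over the split lines into a single pass that carries the first meaningful line forward in a candidate variable.
import Mathlib
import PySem

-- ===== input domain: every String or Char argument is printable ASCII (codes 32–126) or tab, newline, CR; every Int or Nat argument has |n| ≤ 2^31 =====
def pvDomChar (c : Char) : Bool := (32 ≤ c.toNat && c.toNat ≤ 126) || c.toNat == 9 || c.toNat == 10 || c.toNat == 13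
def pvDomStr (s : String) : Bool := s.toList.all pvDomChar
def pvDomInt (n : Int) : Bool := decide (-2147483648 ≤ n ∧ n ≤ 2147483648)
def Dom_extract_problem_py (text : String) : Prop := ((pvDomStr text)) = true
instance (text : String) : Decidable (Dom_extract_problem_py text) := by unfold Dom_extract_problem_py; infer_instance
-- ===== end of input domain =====

-- B fuses A's two sequential scans into one pass carrying a `candidate`; objective: simpler.

-- ===== PORT A =====
-- first loop of A: return stripped 'Problem:'-replaced line on a match
def pyA_scan1 : List String → Option String
  | [] => none
  | l :: rest =>
      if PySem.Str.startswith (PySem.Str.lower l) "problem:" then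
        some (PySem.Str.strip (PySem.Str.replace l "Problem:" ""))
      else pyA_scan1 rest

-- second loop of A: first meaningful line
def pyA_scan2 : List String → Option String
  | [] => none
  | l :: rest =>
      if PySem.Str.len (PySem.Str.strip l) > 10 && !PySem.Str.startswith l "#" then
        some (PySem.Str.strip l)
      else pyA_scan2 rest

def extract_problem_py (text : String) : String :=
  let lines := (PySem.Str.split? text "\n").getD []
  match pyA_scan1 lines with
  | some r => r
  | none =>
    match pyA_scan2 lines with
    | some r => r
    | none => "Mathematical Problem"

-- ===== PORT B =====
def pyB_loop : List String → Option String → String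
  | [], cand => cand.getD "Mathematical Problem"
  | l :: rest, cand =>
      if PySem.Str.startswith (PySem.Str.lower l) "problem:" then
        PySem.Str.strip (PySem.Str.replace l "Problem:" "")
      else if cand.isNone && (PySem.Str.len (PySem.Str.strip l) > 10 && !PySem.Str.startswith l "#") then
        pyB_loop rest (some (PySem.Str.strip l))
      else
        pyB_loop rest cand

def extract_problem_py_alt (text : String) : String :=
  pyB_loop ((PySem.Str.split? text "\n").getD []) none

-- ===== PRECONDITION & SPEC =====
def Spec_extract_problem_py (text : String) (out : String) : Prop := out = extract_problem_py_alt text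
instance (text : String) (out : String) : Decidable (Spec_extract_problem_py text out) := by unfold Spec_extract_problem_py; infer_instance

-- ===== CLAIM (what is proved, stated in full; the proofs are below) =====
def Claim_equal_extract_problem_py : Prop := ∀ (text : String), Dom_extract_problem_py text → Spec_extract_problem_py text (extract_problem_py text)

-- ===== LEMMAS AND PROOFS =====
theorem pyB_loop_eq (lines : List String) (cand : Option String) :
    pyB_loop lines cand =
      match pyA_scan1 lines with
      | some r => r
      | none =>
        match cand with
        | some c => c
        | none =>
          match pyA_scan2 lines with
          | some r => r
          | none => "Mathematical Problem" := by
  induction lines generalizing cand with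
  | nil => cases cand <;> simp [pyB_loop, pyA_scan1, pyA_scan2]
  | cons l rest ih =>
    simp only [pyB_loop, pyA_scan1, pyA_scan2]
    by_cases h1 : PySem.Chars.startswith (PySem.Chars.lower l.toList) ['p','r','o','b','l','e','m',':'] = true
    · simp [h1]
    · by_cases h2 : 10 < (PySem.Chars.strip l.toList).length ∧ PySem.Chars.startswith l.toList ['#'] = false
      · cases cand <;> simp [h1, h2, ih]
      · cases cand <;> simp [h1, h2, ih]

-- ===== VERDICT (by name: the statement is the Claim_ definition above) =====
theorem extract_problem_py_spec : Claim_equal_extract_problem_py := by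
  intro text _
  unfold Spec_extract_problem_py extract_problem_py extract_problem_py_alt
  rw [pyB_loop_eq]
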